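-- pv_equiv track=rewrite | github.com/DanielScabeni/GerenciadorXML | xml_legacy_tk.py | folder_matches_any_token
-- ===== SOURCE A (Python) =====
-- def folder_matches_any_token(folder_name: str, tokens: set[str]) -> bool:
--     digits_only = "".join(ch for ch in folder_name if ch.isdigit())
--     for token in tokens:
--         if folder_name == token:
--             return True
--         if folder_name.startswith(token):
--             return True
--         if digits_only.startswith(token):
--             return True
--     return False
-- ===== SOURCE B (Python) =====
-- def folder_matches_any_token(folder_name: str, tokens: set[str]) -> bool:
--     digits_only = "".join(ch for ch in folder_name if ch.isdigit())
--     prefixes = {folder_name[:i] for i in range(len(folder_name) + 1)}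
--     prefixes |= {digits_only[:i] for i in range(len(digits_only) + 1)}
--     return bool(tokens & prefixes)
-- ===== Notes on version B (the rewrite author's own statement) =====
-- stated objective: alternative
-- what changed: Instead of scanning tokens and testing equality/startswith per token, B builds the set of all prefixes of folder_name and of its digits-only reduction once and returns whether that prefix set intersects tokens.
import Mathlib
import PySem

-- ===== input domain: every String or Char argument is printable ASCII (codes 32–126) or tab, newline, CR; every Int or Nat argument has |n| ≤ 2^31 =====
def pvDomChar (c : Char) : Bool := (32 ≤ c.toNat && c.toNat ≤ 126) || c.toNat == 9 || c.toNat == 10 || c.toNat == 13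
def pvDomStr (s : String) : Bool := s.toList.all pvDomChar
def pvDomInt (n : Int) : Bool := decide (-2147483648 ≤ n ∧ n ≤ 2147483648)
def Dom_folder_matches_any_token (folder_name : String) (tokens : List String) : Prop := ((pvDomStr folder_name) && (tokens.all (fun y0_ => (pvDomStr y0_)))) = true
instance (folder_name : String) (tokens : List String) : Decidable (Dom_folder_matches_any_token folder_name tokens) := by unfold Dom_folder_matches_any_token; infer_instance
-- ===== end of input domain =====

-- B replaces the per-token equality/startswith scan by a prefix set of folder_name and of its
-- digits-only reduction, intersected with tokens (objective: alternative decomposition).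

-- ===== PORT A =====
-- digits_only = "".join(ch for ch in folder_name if ch.isdigit())
def pvDigitsOnly (folder_name : String) : String :=
  String.ofList (folder_name.toList.filter PySem.Chars.isdigit)

-- the 'for token in tokens' loop with its three tests and early returns
def pvLoopA (folder_name digits_only : String) : List String → Bool
  | [] => false
  | token :: rest =>
      if folder_name == token then true
      else if PySem.Str.startswith folder_name token then true
      else if PySem.Str.startswith digits_only token then true
      else pvLoopA folder_name digits_only rest

def folder_matches_any_token (folder_name : String) (tokens : List String) : Bool :=
  pvLoopA folder_name (pvDigitsOnly folder_name) tokens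

-- ===== PORT B =====
-- {s[:i] for i in range(len(s) + 1)} as a list in comprehension order (set-comprehension of distinct values)
def pvPrefixList (cs : List Char) : List String :=
  (List.range (cs.length + 1)).map (fun i => String.ofList (cs.take i))

def folder_matches_any_token_alt (folder_name : String) (tokens : List String) : Bool :=
  let digits_only := String.ofList (folder_name.toList.filter PySem.Chars.isdigit)
  let prefixes : PySem.Set String :=
    PySem.Set.update (PySem.Set.ofList (pvPrefixList folder_name.toList))
      (pvPrefixList digits_only.toList)
  !(PySem.Set.inter tokens prefixes).isEmpty

-- ===== PRECONDITION & SPEC =====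
def Spec_folder_matches_any_token (folder_name : String) (tokens : List String) (out : Bool) : Prop := out = folder_matches_any_token_alt folder_name tokens
instance (folder_name : String) (tokens : List String) (out : Bool) : Decidable (Spec_folder_matches_any_token folder_name tokens out) := by unfold Spec_folder_matches_any_token; infer_instance

-- ===== CLAIM (what is proved, stated in full; the proofs are below) =====
def Claim_equal_folder_matches_any_token : Prop := ∀ (folder_name : String) (tokens : List String), Dom_folder_matches_any_token folder_name tokens → Spec_folder_matches_any_token folder_name tokens (folder_matches_any_token folder_name tokens)

-- ===== LEMMAS AND PROOFS =====

-- A's early-return loop is an 'any' over the three-way test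
theorem pvLoopA_eq_any (fn ds : String) (ts : List String) :
    pvLoopA fn ds ts
      = ts.any (fun t => fn == t || PySem.Str.startswith fn t || PySem.Str.startswith ds t) := by
  induction ts with
  | nil => rfl
  | cons t rest ih =>
      simp only [pvLoopA, List.any_cons, ih]
      by_cases h1 : fn == t
      · simp [h1]
      · simp [h1, Bool.or_assoc]

-- membership in the prefix list is exactly Python's startswith
theorem mem_pvPrefixList (cs : List Char) (t : String) :
    t ∈ pvPrefixList cs ↔ PySem.Chars.startswith cs t.toList = true := by
  unfold pvPrefixList
  simp only [List.mem_map, List.mem_range, PySem.Chars.startswith,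
    List.isPrefixOf_iff_prefix]
  constructor
  · rintro ⟨i, _, rfl⟩
    simpa [String.toList_ofList] using List.take_prefix i cs
  · intro h
    refine ⟨t.toList.length, ?_, ?_⟩
    · have := h.length_le
      omega
    · rw [← List.prefix_iff_eq_take.mp h, String.ofList_toList]

-- the per-token tests agree with membership in the union of the two prefix lists
theorem token_test_iff (fn ds : String) (t : String) :
    (fn == t || PySem.Str.startswith fn t || PySem.Str.startswith ds t) = true
      ↔ (t ∈ pvPrefixList fn.toList ∨ t ∈ pvPrefixList ds.toList) := by
  simp only [Bool.or_eq_true, beq_iff_eq, mem_pvPrefixList, PySem.Str.startswith_eq]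
  constructor
  · rintro ((rfl | h) | h)
    · exact Or.inl (by simp [PySem.Chars.startswith, List.isPrefixOf_iff_prefix])
    · exact Or.inl h
    · exact Or.inr h
  · rintro (h | h)
    · exact Or.inl (Or.inr h)
    · exact Or.inr h

-- bool(tokens & prefixes): the intersection is nonempty iff some token lies in the prefix set
theorem not_isEmpty_inter (tokens : List String) (P : PySem.Set String) :
    (!(PySem.Set.inter tokens P).isEmpty) = true ↔ ∃ t ∈ tokens, t ∈ P := by
  simp [PySem.Set.inter]

-- ===== VERDICT (by name: the statement is the Claim_ definition above) =====
theorem folder_matches_any_token_spec : Claim_equal_folder_matches_any_token := by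
  intro fn tokens _
  unfold Spec_folder_matches_any_token folder_matches_any_token folder_matches_any_token_alt
  rw [pvLoopA_eq_any, Bool.eq_iff_iff]
  simp only [not_isEmpty_inter, List.any_eq_true, PySem.Set.mem_update, PySem.Set.mem_ofList,
    String.toList_ofList, pvDigitsOnly]
  constructor
  · rintro ⟨t, ht, htest⟩
    exact ⟨t, ht, by simpa [String.toList_ofList] using (token_test_iff fn _ t).mp htest⟩
  · rintro ⟨t, ht, hmem⟩
    refine ⟨t, ht, (token_test_iff fn _ t).mpr ?_⟩
    simpa [String.toList_ofList] using hmem
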